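-- pv_equiv track=rewrite | github.com/AitorMalo/Spark-Notebooks | New_MT_Names.py | extract_copy_value
-- ===== SOURCE A (Python) =====
-- def extract_copy_value(row):
--     content = row['Message_Content']
--     start_idx_11S = content.find(':11S:')
--     start_idx_75 = content.find(':75:')
--     start_idx_76 = content.find(':76:')
--     start_idx_79 = content.find(':79:')
--     indices = [idx for idx in [start_idx_11S, start_idx_75, start_idx_76, start_idx_79] if idx != -1]
--     if not indices:
--         return None
--     if indices:
--         min_index = min(indices)
--         return content[min_index:]
-- ===== SOURCE B (Python) =====
-- def extract_copy_value(row):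
--     content = row['Message_Content']
--     tags = (':11S:', ':75:', ':76:', ':79:')
--     for i in range(len(content)):
--         for tag in tags:
--             if content.startswith(tag, i):
--                 return content[i:]
--     return None
-- ===== Notes on version B (the rewrite author's own statement) =====
-- stated objective: alternative
-- what changed: Replaces four independent full-string find() calls plus a min over the surviving indices by a single left-to-right scan that tests all four markers at each position and returns the suffix at the first hit (early termination).
import Mathlib
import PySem

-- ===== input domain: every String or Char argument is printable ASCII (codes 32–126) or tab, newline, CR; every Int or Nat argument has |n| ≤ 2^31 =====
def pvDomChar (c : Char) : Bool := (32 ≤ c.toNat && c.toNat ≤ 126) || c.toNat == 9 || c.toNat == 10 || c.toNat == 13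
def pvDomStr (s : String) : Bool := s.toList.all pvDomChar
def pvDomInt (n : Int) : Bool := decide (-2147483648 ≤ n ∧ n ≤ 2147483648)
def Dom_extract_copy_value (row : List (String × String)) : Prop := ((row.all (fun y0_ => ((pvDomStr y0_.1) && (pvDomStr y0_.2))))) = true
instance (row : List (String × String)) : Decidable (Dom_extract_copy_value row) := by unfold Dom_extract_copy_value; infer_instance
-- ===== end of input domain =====

-- B replaces four full-string find() calls plus min by one left-to-right scan that
-- returns the suffix at the first position where any of the four markers starts.

-- ===== PORT A =====
def extract_copy_value (row : List (String × String)) : Option String :=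
  match (PySem.Dict.mk row).get? "Message_Content" with
  | none => none   -- Python raises KeyError here; excluded by Pre_
  | some content =>
    let start_idx_11S := PySem.Str.find content ":11S:"
    let start_idx_75 := PySem.Str.find content ":75:"
    let start_idx_76 := PySem.Str.find content ":76:"
    let start_idx_79 := PySem.Str.find content ":79:"
    let indices := [start_idx_11S, start_idx_75, start_idx_76, start_idx_79].filter
      (fun idx => idx ≠ -1)
    if indices = [] then none
    else
      match PySem.List.min? indices (fun x => x) with
      | none => none
      | some min_index => some (PySem.Str.slice content (some min_index) none)

-- ===== PORT B =====
def pvTags : List (List Char) :=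
  [[':','1','1','S',':'], [':','7','5',':'], [':','7','6',':'], [':','7','9',':']]

-- the 'for i in range(len(content))' loop of Source B, walking the suffixes of content
def pvScan : List Char → Option (List Char)
  | [] => none
  | c :: rest =>
    if pvTags.any (fun tag => PySem.Chars.startswith (c :: rest) tag) then some (c :: rest)
    else pvScan rest

def extract_copy_value_alt (row : List (String × String)) : Option String :=
  match (PySem.Dict.mk row).get? "Message_Content" with
  | none => none   -- Python raises KeyError here; excluded by Pre_
  | some content => (pvScan content.toList).map String.ofList

-- ===== PRECONDITION & SPEC =====
-- Pre_ excludes exactly the rows without a 'Message_Content' key, where A (and B) raise KeyError.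
def Pre_extract_copy_value (row : List (String × String)) : Prop :=
  ((PySem.Dict.mk row).get? "Message_Content").isSome = true
instance (row : List (String × String)) : Decidable (Pre_extract_copy_value row) := by
  unfold Pre_extract_copy_value; infer_instance

def pvWitness_extract_copy_value : (List (String × String)) := [("Message_Content", "ab:75:cd")]

def Spec_extract_copy_value (row : List (String × String)) (out : Option String) : Prop := out = extract_copy_value_alt row
instance (row : List (String × String)) (out : Option String) : Decidable (Spec_extract_copy_value row out) := by unfold Spec_extract_copy_value; infer_instance

-- ===== CLAIM (what is proved, stated in full; the proofs are below) =====
def Claim_equal_extract_copy_value : Prop := ∀ (row : List (String × String)), Dom_extract_copy_value row → Pre_extract_copy_value row → Spec_extract_copy_value row (extract_copy_value row)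

-- ===== LEMMAS AND PROOFS =====

-- If no tag occurs anywhere in cs, the scan finds nothing.
lemma pvScan_none (cs : List Char) (h : ∀ t ∈ pvTags, ¬ t <:+: cs) : pvScan cs = none := by
  induction cs with
  | nil => rfl
  | cons c rest ih =>
    have hany : pvTags.any (fun tag => PySem.Chars.startswith (c :: rest) tag) = false := by
      simp only [List.any_eq_false]
      intro t ht
      simp only [PySem.Chars.startswith_iff]  -- reduce to ¬ prefix
      intro hp
      exact h t ht hp.isInfix
    simp [pvScan, hany]
    exact ih (fun t ht hinf => h t ht (hinf.trans (List.suffix_cons c rest).isInfix))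

-- If the least position where some tag starts is m, the scan returns the suffix at m.
lemma pvScan_some (m : Nat) : ∀ cs : List Char,
    (∃ t ∈ pvTags, t <+: cs.drop m) →
    (∀ j < m, ∀ t ∈ pvTags, ¬ t <+: cs.drop j) →
    pvScan cs = some (cs.drop m) := by
  induction m with
  | zero =>
    intro cs ⟨t, ht, hp⟩ _
    cases cs with
    | nil =>
      exfalso
      have := List.prefix_nil.mp hp
      subst this
      revert ht; decide
    | cons c rest =>
      have hany : pvTags.any (fun tag => PySem.Chars.startswith (c :: rest) tag) = true := by
        simp only [List.any_eq_true]
        exact ⟨t, ht, (PySem.Chars.startswith_iff _ _).mpr hp⟩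
      simp [pvScan, hany]
  | succ k ih =>
    intro cs hex hmin
    cases cs with
    | nil =>
      exfalso
      obtain ⟨t, ht, hp⟩ := hex
      simp only [List.drop_nil] at hp
      have := List.prefix_nil.mp hp
      subst this
      revert ht; decide
    | cons c rest =>
      have hany : pvTags.any (fun tag => PySem.Chars.startswith (c :: rest) tag) = false := by
        simp only [List.any_eq_false]
        intro t ht
        simp only [PySem.Chars.startswith_iff]
        exact hmin 0 (Nat.succ_pos k) t ht
      simp only [pvScan, hany, Bool.false_eq_true, if_false]
      exact ih rest (by simpa using hex) (fun j hj t ht => by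
        have := hmin (j + 1) (by omega) t ht
        simpa using this)

-- a prefix of a dropped suffix is an infix
lemma pvPrefix_drop_infix {t cs : List Char} {j : Nat} (h : t <+: cs.drop j) : t <:+: cs :=
  h.isInfix.trans (List.drop_suffix j cs).isInfix

-- Core agreement on the message content itself.
lemma pvCore (content : String) :
    (let start_idx_11S := PySem.Str.find content ":11S:"
     let start_idx_75 := PySem.Str.find content ":75:"
     let start_idx_76 := PySem.Str.find content ":76:"
     let start_idx_79 := PySem.Str.find content ":79:"
     let indices := [start_idx_11S, start_idx_75, start_idx_76, start_idx_79].filter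
       (fun idx => idx ≠ -1)
     if indices = [] then (none : Option String)
     else
       match PySem.List.min? indices (fun x => x) with
       | none => none
       | some min_index => some (PySem.Str.slice content (some min_index) none)) =
    (pvScan content.toList).map String.ofList := by
  simp only [PySem.Str.find_eq]
  set cs := content.toList with hcs
  set indices : List Int := [PySem.Chars.find cs ":11S:".toList, PySem.Chars.find cs ":75:".toList,
      PySem.Chars.find cs ":76:".toList, PySem.Chars.find cs ":79:".toList].filter
      (fun idx => idx ≠ -1) with hind
  have hmemF : ∀ t ∈ pvTags, t <:+: cs → PySem.Chars.find cs t ∈ indices := by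
    intro t ht hinf
    have hne : PySem.Chars.find cs t ≠ -1 := (PySem.Chars.find_ne_neg_one_iff cs t).mpr hinf
    rw [hind]
    refine List.mem_filter.mpr ⟨?_, by simpa using hne⟩
    fin_cases ht <;> simp
  by_cases hemp : indices = []
  · -- no tag occurs: both sides are none
    rw [hemp]
    have hnone : pvScan cs = none := by
      apply pvScan_none
      intro t ht hinf
      have := hmemF t ht hinf
      rw [hemp] at this
      simp at this
    rw [hnone]; rfl
  · rw [if_neg hemp]
    obtain ⟨m, hmin⟩ : ∃ m, PySem.List.min? indices (fun x => x) = some m := by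
      cases h : PySem.List.min? indices (fun x => x) with
      | none => exact absurd ((PySem.List.min?_eq_none_iff indices _).mp h) hemp
      | some m => exact ⟨m, rfl⟩
    rw [hmin]
    have hm_mem := PySem.List.min?_mem hmin
    have hm_min : ∀ y ∈ indices, m ≤ y := PySem.List.min?_isMin hmin
    -- m is the find of one of the tags, and it is ≠ -1
    have hm_ne : m ≠ -1 := by
      rw [hind] at hm_mem
      simpa using (List.mem_filter.mp hm_mem).2
    obtain ⟨t, ht, hFt⟩ : ∃ t ∈ pvTags, PySem.Chars.find cs t = m := by
      rw [hind] at hm_mem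
      have := (List.mem_filter.mp hm_mem).1
      simp only [List.mem_cons, List.not_mem_nil, or_false] at this
      rcases this with h | h | h | h
      · exact ⟨":11S:".toList, by decide, h.symm⟩
      · exact ⟨":75:".toList, by decide, h.symm⟩
      · exact ⟨":76:".toList, by decide, h.symm⟩
      · exact ⟨":79:".toList, by decide, h.symm⟩
    have hm0 : 0 ≤ m := by
      have := PySem.Chars.neg_one_le_find cs t
      rw [hFt] at this
      omega
    have hspec := PySem.Chars.find_spec (s := cs) (sub := t) (by rw [hFt]; exact hm0)
    rw [hFt] at hspec
    -- the scan stops exactly at position m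
    have hscan : pvScan cs = some (cs.drop m.toNat) := by
      apply pvScan_some
      · exact ⟨t, ht, hspec.1⟩
      · intro j hj t' ht' hp
        have hinf : t' <:+: cs := pvPrefix_drop_infix hp
        have hne' : PySem.Chars.find cs t' ≠ -1 :=
          (PySem.Chars.find_ne_neg_one_iff cs t').mpr hinf
        have hle : m ≤ PySem.Chars.find cs t' := hm_min _ (hmemF t' ht' hinf)
        have h0' : 0 ≤ PySem.Chars.find cs t' := by
          have := PySem.Chars.neg_one_le_find cs t'
          omega
        have hspec' := PySem.Chars.find_spec (s := cs) (sub := t') h0'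
        exact hspec'.2 j (by omega) hp
    rw [hscan]
    -- slices agree
    simp only [Option.map_some]
    congr 1
    apply String.toList_injective
    rw [PySem.Str.toList_slice, PySem.Chars.slice_eq_listSlice, PySem.List.slice_from cs hm0,
      String.toList_ofList]

-- ===== VERDICT (by name: the statement is the Claim_ definition above) =====
theorem extract_copy_value_spec : Claim_equal_extract_copy_value := by
  intro row _ hpre
  unfold Spec_extract_copy_value extract_copy_value extract_copy_value_alt
  cases hget : (PySem.Dict.mk row).get? "Message_Content" with
  | none => simp [Pre_extract_copy_value, hget] at hpre
  | some content => simpa using pvCore content
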